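-- pv_equiv track=rewrite | github.com/mzmzeee/EE569DeepLearningFall2024 | Generation.py | parse_generation
-- ===== SOURCE A (Python) =====
-- def parse_generation(generation):
--     lines = generation.split("\n")
--     context = []
--     question = []
--     answer = []
--     flag = None
--
--     for line in lines:
--         if "CONTEXT:" in line:
--             flag = "context"
--             line = line.replace("CONTEXT:", "").strip()
--         elif "QUESTION:" in line:
--             flag = "question"
--             line = line.replace("QUESTION:", "").strip()
--         elif "ANSWER:" in line:
--             flag = "answer"
--             line = line.replace("ANSWER:", "").strip()
--
--         if flag == "context":
--             context.append(line)
--         elif flag == "question":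
--             question.append(line)
--         elif flag == "answer":
--             answer.append(line)
--
--     context = "\n".join(context)
--     question = "\n".join(question)
--     answer = "\n".join(answer)
--     return context, question, answer
-- ===== SOURCE B (Python) =====
-- def parse_generation(generation):
--     markers = (("CONTEXT:", "context"), ("QUESTION:", "question"), ("ANSWER:", "answer"))
--     tagged = []
--     flag = None
--     for line in generation.split("\n"):
--         for mark, name in markers:
--             if mark in line:
--                 flag = name
--                 line = line.replace(mark, "").strip()
--                 break
--         tagged.append((flag, line))
--     return tuple("\n".join(t for f, t in tagged if f == s)
--                  for s in ("context", "question", "answer"))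
-- ===== Notes on version B (the rewrite author's own statement) =====
-- stated objective: alternative
-- what changed: Splits A's single loop with three interleaved conditional appends into a tagging scan that labels every line with its section, followed by three independent filter-and-join passes over the tagged list.
import Mathlib
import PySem

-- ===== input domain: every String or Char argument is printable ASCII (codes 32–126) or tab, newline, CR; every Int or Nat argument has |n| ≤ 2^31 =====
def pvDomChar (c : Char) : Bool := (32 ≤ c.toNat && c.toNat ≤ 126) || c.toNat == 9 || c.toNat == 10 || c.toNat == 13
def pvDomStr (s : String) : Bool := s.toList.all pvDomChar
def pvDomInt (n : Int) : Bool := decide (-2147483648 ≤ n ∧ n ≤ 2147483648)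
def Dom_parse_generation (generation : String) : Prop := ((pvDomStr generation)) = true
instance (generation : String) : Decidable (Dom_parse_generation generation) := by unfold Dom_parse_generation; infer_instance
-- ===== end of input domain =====

-- B replaces A's single loop with interleaved conditional appends by a tagging scan plus
-- three independent filter-and-join passes; alternative decomposition, same cost.

-- ===== PORT A =====
-- one loop iteration of A: update flag/line by the marker elif-chain, then append to one bucket
def pgStepA (st : (List String × List String × List String) × Option String) (line : String) :
    (List String × List String × List String) × Option String :=
  let flag := st.2
  let fl :=
    if PySem.Str.isIn "CONTEXT:" line then
      (some "context", PySem.Str.strip (PySem.Str.replace line "CONTEXT:" ""))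
    else if PySem.Str.isIn "QUESTION:" line then
      (some "question", PySem.Str.strip (PySem.Str.replace line "QUESTION:" ""))
    else if PySem.Str.isIn "ANSWER:" line then
      (some "answer", PySem.Str.strip (PySem.Str.replace line "ANSWER:" ""))
    else (flag, line)
  let flag := fl.1
  let line := fl.2
  if flag == some "context" then ((st.1.1 ++ [line], st.1.2.1, st.1.2.2), flag)
  else if flag == some "question" then ((st.1.1, st.1.2.1 ++ [line], st.1.2.2), flag)
  else if flag == some "answer" then ((st.1.1, st.1.2.1, st.1.2.2 ++ [line]), flag)
  else (st.1, flag)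

def parse_generation (generation : String) : String × String × String :=
  let lines := (PySem.Str.split? generation "\n").getD []
  let st := lines.foldl pgStepA (([], [], []), none)
  (PySem.Str.join "\n" st.1.1, PySem.Str.join "\n" st.1.2.1, PySem.Str.join "\n" st.1.2.2)

-- ===== PORT B =====
-- B's inner marker loop: first matching marker sets the tag and strips the line
def pgMark (flag : Option String) (line : String) : Option String × String :=
  if PySem.Str.isIn "CONTEXT:" line then
    (some "context", PySem.Str.strip (PySem.Str.replace line "CONTEXT:" ""))
  else if PySem.Str.isIn "QUESTION:" line then
    (some "question", PySem.Str.strip (PySem.Str.replace line "QUESTION:" ""))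
  else if PySem.Str.isIn "ANSWER:" line then
    (some "answer", PySem.Str.strip (PySem.Str.replace line "ANSWER:" ""))
  else (flag, line)

-- tagging scan: label every line with the current section
def pgTagged : Option String → List String → List (Option String × String)
  | _, [] => []
  | flag, l :: rest =>
    let t := pgMark flag l
    t :: pgTagged t.1 rest

-- one filtering join: '\n'.join(t for f, t in tagged if f == s)
def pgCollect (tagged : List (Option String × String)) (s : String) : String :=
  PySem.Str.join "\n" ((tagged.filter (fun t => t.1 == some s)).map (·.2))

def parse_generation_alt (generation : String) : String × String × String :=
  let tagged := pgTagged none ((PySem.Str.split? generation "\n").getD [])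
  (pgCollect tagged "context", pgCollect tagged "question", pgCollect tagged "answer")

-- ===== PRECONDITION & SPEC =====
def Spec_parse_generation (generation : String) (out : String × String × String) : Prop := out = parse_generation_alt generation
instance (generation : String) (out : String × String × String) : Decidable (Spec_parse_generation generation out) := by unfold Spec_parse_generation; infer_instance

-- ===== CLAIM (what is proved, stated in full; the proofs are below) =====
def Claim_equal_parse_generation : Prop := ∀ (generation : String), Dom_parse_generation generation → Spec_parse_generation generation (parse_generation generation)

-- ===== LEMMAS AND PROOFS =====

-- A's step, written through B's pgMark
lemma pgStepA_eq (acc : List String × List String × List String) (flag : Option String) (line : String) :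
    pgStepA (acc, flag) line =
      ((if (pgMark flag line).1 == some "context" then acc.1 ++ [(pgMark flag line).2] else acc.1,
        if (pgMark flag line).1 == some "question" then acc.2.1 ++ [(pgMark flag line).2] else acc.2.1,
        if (pgMark flag line).1 == some "answer" then acc.2.2 ++ [(pgMark flag line).2] else acc.2.2),
       (pgMark flag line).1) := by
  simp only [pgStepA, pgMark]
  split_ifs <;> simp_all

-- A's fold fills each bucket with exactly the lines B's tagging scan labels with that section
lemma foldA_eq (lines : List String) : ∀ (flag : Option String) (c q a : List String),
    (lines.foldl pgStepA ((c, q, a), flag)).1 =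
      (c ++ ((pgTagged flag lines).filter (fun t => t.1 == some "context")).map (·.2),
       q ++ ((pgTagged flag lines).filter (fun t => t.1 == some "question")).map (·.2),
       a ++ ((pgTagged flag lines).filter (fun t => t.1 == some "answer")).map (·.2)) := by
  induction lines with
  | nil => intro flag c q a; simp [pgTagged]
  | cons l rest ih =>
    intro flag c q a
    rw [List.foldl_cons, pgStepA_eq]
    rw [ih]
    simp only [pgTagged, List.filter_cons]
    by_cases h1 : (pgMark flag l).1 == some "context" <;>
      by_cases h2 : (pgMark flag l).1 == some "question" <;>
        by_cases h3 : (pgMark flag l).1 == some "answer" <;>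
          simp_all

-- ===== VERDICT (by name: the statement is the Claim_ definition above) =====
theorem parse_generation_spec : Claim_equal_parse_generation := by
  intro generation _
  simp only [Spec_parse_generation, parse_generation, parse_generation_alt, pgCollect, foldA_eq,
    List.nil_append]
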